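-- pv_equiv track=rewrite | github.com/hilmican/hm | app/services/ai_utils.py | detect_color_count
-- ===== SOURCE A (Python) =====
-- from typing import Dict, List, Optional, Any
--
-- def detect_color_count(stock: List[Dict[str, Any]]) -> bool:
-- 	"""
-- 	Detect if product has multiple colors based on stock list.
--
-- 	Returns True if product has multiple distinct colors, False otherwise.
-- 	"""
-- 	if not stock or not isinstance(stock, list):
-- 		return False
--
-- 	colors: set[str] = set()
-- 	for entry in stock:
-- 		if not isinstance(entry, dict):
-- 			continue
-- 		color = entry.get("color")
-- 		if color:
-- 			# Normalize color string
-- 			color_str = str(color).strip().upper()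
-- 			if color_str:
-- 				colors.add(color_str)
--
-- 	# If we have more than one distinct color, product has multiple colors
-- 	return len(colors) > 1
-- ===== SOURCE B (Python) =====
-- def detect_color_count(stock):
--     """Return True iff the stock entries carry more than one distinct normalized color."""
--     if not stock or not isinstance(stock, list):
--         return False
--     first_color = None
--     for entry in stock:
--         if not isinstance(entry, dict):
--             continue
--         color = entry.get("color")
--         if color:
--             color_str = str(color).strip().upper()
--             if color_str:
--                 if first_color is None:
--                     first_color = color_str
--                 elif color_str != first_color:
--                     return True
--     return False
-- ===== Notes on version B (the rewrite author's own statement) =====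
-- stated objective: simpler
-- what changed: Instead of accumulating a set of all distinct normalized colors and counting it at the end, B keeps only the first normalized color seen and returns True immediately on the first later color that differs (short-circuit, O(1) extra state).
import Mathlib
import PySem

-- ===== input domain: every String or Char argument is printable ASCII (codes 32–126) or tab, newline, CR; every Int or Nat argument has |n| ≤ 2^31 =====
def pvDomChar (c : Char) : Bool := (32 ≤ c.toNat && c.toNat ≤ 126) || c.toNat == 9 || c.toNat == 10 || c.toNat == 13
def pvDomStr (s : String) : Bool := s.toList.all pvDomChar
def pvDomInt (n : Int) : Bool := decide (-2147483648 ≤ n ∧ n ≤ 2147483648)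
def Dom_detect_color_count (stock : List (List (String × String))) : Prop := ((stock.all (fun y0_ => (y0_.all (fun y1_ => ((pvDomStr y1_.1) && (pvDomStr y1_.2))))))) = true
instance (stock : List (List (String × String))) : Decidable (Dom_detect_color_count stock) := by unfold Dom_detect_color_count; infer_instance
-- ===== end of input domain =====

-- B replaces A's set of all distinct normalized colors by a single first-color variable and
-- short-circuits on the first differing later color (objective: simpler).


-- ===== PORT A =====
-- one loop step of A: entry.get("color"); if color: cstr = str(color).strip().upper(); if cstr: colors.add(cstr)
def dccStep (cs : PySem.Set String) (entry : List (String × String)) : PySem.Set String :=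
  match List.lookup "color" entry with
  | none => cs
  | some color =>
    if color ≠ "" then
      let color_str := PySem.Str.upper (PySem.Str.strip color)
      if color_str ≠ "" then PySem.Set.add cs color_str else cs
    else cs

def detect_color_count (stock : List (List (String × String))) : Bool :=
  if stock.isEmpty then false
  else
    let colors : PySem.Set String := stock.foldl dccStep PySem.Set.empty
    decide (colors.length > 1)

-- ===== PORT B =====
-- B's loop: carry the first normalized color; return True on the first differing later one
def dccAltLoop (first : Option String) (stock : List (List (String × String))) : Bool :=
  match stock with
  | [] => false
  | entry :: rest =>
    match List.lookup "color" entry with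
    | none => dccAltLoop first rest
    | some color =>
      if color ≠ "" then
        let color_str := PySem.Str.upper (PySem.Str.strip color)
        if color_str ≠ "" then
          match first with
          | none => dccAltLoop (some color_str) rest
          | some f => if color_str ≠ f then true else dccAltLoop first rest
        else dccAltLoop first rest
      else dccAltLoop first rest

def detect_color_count_alt (stock : List (List (String × String))) : Bool :=
  if stock.isEmpty then false
  else dccAltLoop none stock

-- ===== PRECONDITION & SPEC =====
def Spec_detect_color_count (stock : List (List (String × String))) (out : Bool) : Prop := out = detect_color_count_alt stock
instance (stock : List (List (String × String))) (out : Bool) : Decidable (Spec_detect_color_count stock out) := by unfold Spec_detect_color_count; infer_instance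

-- ===== CLAIM (what is proved, stated in full; the proofs are below) =====
def Claim_equal_detect_color_count : Prop := ∀ (stock : List (List (String × String))), Dom_detect_color_count stock → Spec_detect_color_count stock (detect_color_count stock)

-- ===== LEMMAS AND PROOFS =====

theorem dccStep_length_le (cs : PySem.Set String) (entry : List (String × String)) :
    cs.length ≤ (dccStep cs entry).length := by
  unfold dccStep
  cases List.lookup "color" entry with
  | none => exact le_refl _
  | some color =>
    simp only
    split_ifs with h1 h2
    · simp [PySem.Set.add]; split_ifs <;> simp
    · exact le_refl _
    · exact le_refl _

theorem foldl_dccStep_length_le (rest : List (List (String × String))) (cs : PySem.Set String) :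
    cs.length ≤ (rest.foldl dccStep cs).length := by
  induction rest generalizing cs with
  | nil => exact le_refl _
  | cons e rest ih =>
    simpa using le_trans (dccStep_length_le cs e) (ih (dccStep cs e))

-- the core invariant: while A's set is empty or a singleton, B's loop state head? matches it
theorem dccAltLoop_eq (rest : List (List (String × String))) (cs : PySem.Set String)
    (h : cs = [] ∨ ∃ f, cs = [f]) :
    dccAltLoop cs.head? rest = decide (1 < (rest.foldl dccStep cs).length) := by
  induction rest generalizing cs with
  | nil =>
    rcases h with h | ⟨f, h⟩ <;> subst h <;> simp [dccAltLoop]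
  | cons entry rest ih =>
    have hstep : List.foldl dccStep cs (entry :: rest) = rest.foldl dccStep (dccStep cs entry) := rfl
    rw [hstep]
    rcases h with h | ⟨f, h⟩ <;> subst h
    · -- cs = []
      show dccAltLoop none (entry :: rest) = _
      unfold dccAltLoop dccStep
      cases List.lookup "color" entry with
      | none => exact ih [] (Or.inl rfl)
      | some color =>
        simp only
        split_ifs with h1 h2
        · have : (PySem.Set.add ([] : PySem.Set String) (PySem.Str.upper (PySem.Str.strip color))) =
              [PySem.Str.upper (PySem.Str.strip color)] := by simp [PySem.Set.add, PySem.Set.contains]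
          rw [this]
          exact ih [PySem.Str.upper (PySem.Str.strip color)] (Or.inr ⟨_, rfl⟩)
        · exact ih [] (Or.inl rfl)
        · exact ih [] (Or.inl rfl)
    · -- cs = [f]
      show dccAltLoop (some f) (entry :: rest) = _
      unfold dccAltLoop dccStep
      cases List.lookup "color" entry with
      | none => exact ih [f] (Or.inr ⟨f, rfl⟩)
      | some color =>
        simp only
        split_ifs with h1 h2 h3
        · -- valid new color, differs from f: B returns true; A's set reaches length 2
          have hadd : (PySem.Set.add ([f] : PySem.Set String) (PySem.Str.upper (PySem.Str.strip color))) =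
              [f, PySem.Str.upper (PySem.Str.strip color)] := by
            simp [PySem.Set.add, PySem.Set.contains, h3]
          rw [hadd]
          have hlen := foldl_dccStep_length_le rest [f, PySem.Str.upper (PySem.Str.strip color)]
          simp only [List.length_cons, List.length_nil] at hlen
          have hgt : 1 < (List.foldl dccStep [f, PySem.Str.upper (PySem.Str.strip color)] rest).length := by omega
          exact (decide_eq_true hgt).symm
        · -- valid new color equal to f: set unchanged
          have heq : PySem.Str.upper (PySem.Str.strip color) = f := by
            by_contra hc; exact h3 hc
          have hadd : (PySem.Set.add ([f] : PySem.Set String) (PySem.Str.upper (PySem.Str.strip color))) = [f] := by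
            rw [heq]; simp [PySem.Set.add, PySem.Set.contains]
          rw [hadd]
          exact ih [f] (Or.inr ⟨f, rfl⟩)
        · exact ih [f] (Or.inr ⟨f, rfl⟩)
        · exact ih [f] (Or.inr ⟨f, rfl⟩)

-- ===== VERDICT (by name: the statement is the Claim_ definition above) =====
theorem detect_color_count_spec : Claim_equal_detect_color_count := by
  intro stock _
  unfold Spec_detect_color_count detect_color_count detect_color_count_alt
  split_ifs with h
  · rfl
  · have := dccAltLoop_eq stock [] (Or.inl rfl)
    simpa [PySem.Set.empty] using this.symm
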